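-- pv_equiv track=rewrite | github.com/KenOokamiHoro/lykos | src/utilities.py | plural
-- ===== SOURCE A (Python) =====
-- def plural(role: str, count: int=2) -> str:
--     if count == 1:
--         return role
--     bits = role.split()
--     if bits[-1][-2:] == "'s":
--         bits[-1] = plural(bits[-1][:-2], count)
--         bits[-1] += "'" if bits[-1][-1] == "s" else "'s"
--     else:
--         bits[-1] = {"person": "people",
--                     "wolf": "wolves",
--                     "has": "have",
--                     "succubus": "succubi",
--                     "child": "children"}.get(bits[-1], bits[-1] + "s")
--     return " ".join(bits)
-- ===== SOURCE B (Python) =====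
-- def plural(role: str, count: int=2) -> str:
--     if count == 1:
--         return role
--     bits = role.split()
--     word = bits[-1]
--     depth = 0
--     while word.endswith("'s"):
--         word = word[:-2]
--         depth += 1
--     word = {"person": "people",
--             "wolf": "wolves",
--             "has": "have",
--             "succubus": "succubi",
--             "child": "children"}.get(word, word + "s")
--     for _ in range(depth):
--         word += "'" if word[-1] == "s" else "'s"
--     bits[-1] = word
--     return " ".join(bits)
-- ===== Notes on version B (the rewrite author's own statement) =====
-- stated objective: alternative
-- what changed: Replaces A's recursion (which re-splits and re-joins the role at every nested "'s" possessive) with a single iterative pass over the last word: strip all trailing "'s" suffixes while counting them, pluralize the base once via the table, then reattach the possessives in a loop.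
-- outside the precondition, e.g. on plural("'s", 2): A raises IndexError, B returns "s'"
import Mathlib
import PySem

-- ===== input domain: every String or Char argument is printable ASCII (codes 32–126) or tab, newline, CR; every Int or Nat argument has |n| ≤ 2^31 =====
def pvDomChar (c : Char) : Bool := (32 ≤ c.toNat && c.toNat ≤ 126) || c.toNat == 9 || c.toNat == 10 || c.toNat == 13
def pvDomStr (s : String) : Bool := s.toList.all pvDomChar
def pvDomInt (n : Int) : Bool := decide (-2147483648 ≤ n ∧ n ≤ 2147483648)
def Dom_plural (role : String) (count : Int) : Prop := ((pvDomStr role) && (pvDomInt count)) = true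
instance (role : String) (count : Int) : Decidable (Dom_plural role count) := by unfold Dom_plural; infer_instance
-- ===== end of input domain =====

-- B replaces A's re-splitting recursion by a single strip-count-reattach loop over the last word (alternative decomposition, same cost).
-- The special-case pluralization table, shared verbatim by both Pythons.
def pluralizeBase (w : List Char) : List Char :=
  if w = "person".toList then "people".toList
  else if w = "wolf".toList then "wolves".toList
  else if w = "has".toList then "have".toList
  else if w = "succubus".toList then "succubi".toList
  else if w = "child".toList then "children".toList
  else w ++ ['s']

-- ===== PORT A =====
-- A recurses on bits[-1][:-2]; fuel (length-based, always sufficient) only makes the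
-- same recursion structurally terminating.  The `none` branch is Python's IndexError
-- on a wordless role (excluded by Pre_plural).
def pluralCharsA : Nat → List Char → Int → List Char
  | 0, r, _ => r
  | fuel+1, r, count =>
    if count = 1 then r
    else
      let bits := PySem.Chars.split₀ r
      match bits.getLast? with
      | none => []
      | some w =>
        if PySem.Chars.slice w (some (-2)) none = ['\'', 's'] then
          let p := pluralCharsA fuel (PySem.Chars.slice w none (some (-2))) count
          let p2 := p ++ (if PySem.List.pyGet? p (-1) = some 's' then ['\''] else ['\'', 's'])
          PySem.Chars.join [' '] (bits.dropLast ++ [p2])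
        else
          PySem.Chars.join [' '] (bits.dropLast ++ [pluralizeBase w])

def plural (role : String) (count : Int) : String :=
  String.ofList (pluralCharsA (role.toList.length + 1) role.toList count)

-- ===== PORT B =====
-- while word.endswith("'s"): word = word[:-2]; depth += 1
-- (fuel = word length, always sufficient: each iteration drops two characters)
def stripLoop : Nat → List Char → List Char × Nat
  | 0, w => (w, 0)
  | fuel+1, w =>
    if PySem.Chars.endswith w ['\'', 's'] = true then
      let r := stripLoop fuel (PySem.Chars.slice w none (some (-2)))
      (r.1, r.2 + 1)
    else (w, 0)

-- for _ in range(depth): word += "'" if word[-1] == "s" else "'s"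
def reattachLoop : Nat → List Char → List Char
  | 0, w => w
  | n+1, w => reattachLoop n (w ++ (if PySem.List.pyGet? w (-1) = some 's' then ['\''] else ['\'', 's']))

def plural_alt (role : String) (count : Int) : String :=
  if count = 1 then role
  else
    let bits := PySem.Chars.split₀ role.toList
    match bits.getLast? with
    | none => ""
    | some w =>
      let r := stripLoop w.length w
      String.ofList (PySem.Chars.join [' '] (bits.dropLast ++ [reattachLoop r.2 (pluralizeBase r.1)]))

-- ===== PRECONDITION & SPEC =====
-- Pre_ excludes exactly the inputs where A raises IndexError: count ≠ 1 with a role that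
-- has no words, or whose last word is a pure repetition "'s's…'s" (the recursion strips it
-- to the empty string, whose split is empty).
def Pre_plural (role : String) (count : Int) : Prop :=
  count = 1 ∨
    (PySem.Chars.split₀ role.toList ≠ [] ∧
      (PySem.Chars.split₀ role.toList).getLastD [] ≠
        List.flatten (List.replicate (((PySem.Chars.split₀ role.toList).getLastD []).length / 2) ['\'', 's']))
instance (role : String) (count : Int) : Decidable (Pre_plural role count) := by
  unfold Pre_plural; infer_instance

def pvWitness_plural : String × Int := ("wolf's cub", 2)

def Spec_plural (role : String) (count : Int) (out : String) : Prop := out = plural_alt role count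
instance (role : String) (count : Int) (out : String) : Decidable (Spec_plural role count out) := by
  unfold Spec_plural; infer_instance

-- ===== CLAIM (what is proved, stated in full; the proofs are below) =====
def Claim_equal_plural : Prop := ∀ (role : String) (count : Int),
  Dom_plural role count → Pre_plural role count → Spec_plural role count (plural role count)

-- ===== LEMMAS AND PROOFS =====

theorem split_go_inv (k : Nat) :
    ∀ (s cur acc : _), s.length + cur.length ≤ k →
    (∀ a ∈ acc, a ≠ [] ∧ (∀ c ∈ a, PySem.Chars.isspace c = false) ∧ a.length ≤ k) →
    (∀ c ∈ cur, PySem.Chars.isspace c = false) →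
    ∀ w ∈ PySem.Chars.split₀.go s cur acc,
      w ≠ [] ∧ (∀ c ∈ w, PySem.Chars.isspace c = false) ∧ w.length ≤ k := by
  intro s
  induction s with
  | nil =>
    intro cur acc hlen hacc hcur w hw
    rw [PySem.Chars.split₀.go] at hw
    by_cases hc : cur.isEmpty
    · simp [hc] at hw
      exact hacc w hw
    · simp [hc] at hw
      rcases hw with hw | rfl
      · exact hacc w hw
      · refine ⟨by simpa using fun h => hc (by simp [h]), ?_, by simpa using hlen⟩
        intro c hcmem; exact hcur c (by simpa using hcmem)
  | cons c rest ih =>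
    intro cur acc hlen hacc hcur w hw
    rw [PySem.Chars.split₀.go] at hw
    by_cases hsp : PySem.Chars.isspace c = true
    · by_cases hc : cur.isEmpty
      · simp [hsp, hc] at hw
        refine ih [] acc (by simp at hlen ⊢; omega) hacc (by simp) w hw
      · simp [hsp, hc] at hw
        refine ih [] (cur.reverse :: acc) (by simp at hlen ⊢; omega) ?_ (by simp) w hw
        intro a ha
        rcases List.mem_cons.mp ha with rfl | ha
        · refine ⟨by simpa using fun h => hc (by simp [h]), ?_, by simp at hlen ⊢; omega⟩
          intro d hd; exact hcur d (by simpa using hd)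
        · exact hacc a ha
    · simp [hsp] at hw
      refine ih (c :: cur) acc (by simp at hlen ⊢; omega) hacc ?_ w hw
      intro d hd
      rcases List.mem_cons.mp hd with rfl | hd
      · simpa using hsp
      · exact hcur d hd
theorem split₀_mem {s w : List Char} (h : w ∈ PySem.Chars.split₀ s) :
    w ≠ [] ∧ (∀ c ∈ w, PySem.Chars.isspace c = false) ∧ w.length ≤ s.length := by
  refine split_go_inv s.length s [] [] (by simp) (by simp) (by simp) w ?_
  simpa [PySem.Chars.split₀] using h

theorem split_go_nospace (s : List Char) :
    ∀ cur acc, (∀ c ∈ s, PySem.Chars.isspace c = false) →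
    PySem.Chars.split₀.go s cur acc = PySem.Chars.split₀.go [] (s.reverse ++ cur) acc := by
  induction s with
  | nil => intro cur acc _; rfl
  | cons c rest ih =>
    intro cur acc hns
    have hc : PySem.Chars.isspace c = false := hns c (by simp)
    rw [show PySem.Chars.split₀.go (c :: rest) cur acc =
        PySem.Chars.split₀.go rest (c :: cur) acc by
      rw [PySem.Chars.split₀.go]; simp [hc]]
    rw [ih (c :: cur) acc (fun d hd => hns d (by simp [hd]))]
    simp

theorem split₀_single {w : List Char} (hne : w ≠ [])
    (hns : ∀ c ∈ w, PySem.Chars.isspace c = false) :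
    PySem.Chars.split₀ w = [w] := by
  rw [PySem.Chars.split₀, split_go_nospace w [] [] hns, PySem.Chars.split₀.go]
  simp [List.isEmpty_iff, hne]

theorem endswith_iff (w : List Char) :
    PySem.Chars.endswith w ['\'', 's'] = true ↔ ∃ t, w = t ++ ['\'', 's'] := by
  simp only [PySem.Chars.endswith, List.isSuffixOf, List.isPrefixOf_iff_prefix]
  constructor
  · rintro ⟨t, ht⟩
    exact ⟨t.reverse, by simpa using (congrArg List.reverse ht).symm⟩
  · rintro ⟨t, rfl⟩
    exact ⟨t.reverse, by simp⟩

theorem cond_iff (w : List Char) :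
    PySem.Chars.slice w (some (-2)) none = ['\'', 's'] ↔ ∃ t, w = t ++ ['\'', 's'] := by
  have hs : PySem.Chars.slice w (some (-2)) none = w.drop (w.length - 2) := by
    simpa [PySem.Chars.slice] using PySem.List.slice_from_neg_ofNat w 2 (by omega)
  rw [hs]
  constructor
  · intro h
    exact ⟨w.take (w.length - 2), by rw [← h, List.take_append_drop]⟩
  · rintro ⟨t, rfl⟩
    have hL : (t ++ ['\'', 's']).length - 2 = t.length := by simp
    rw [hL, List.drop_left]

theorem slice_drop2 (t : List Char) :
    PySem.Chars.slice (t ++ ['\'', 's']) none (some (-2)) = t := by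
  have hs := PySem.List.slice_to_neg_ofNat (t ++ ['\'', 's']) 2 (by omega)
  have hL : (t ++ ['\'', 's']).length - 2 = t.length := by simp
  simpa [PySem.Chars.slice, hL, List.take_left] using hs

theorem length_flat (k : Nat) :
    (List.flatten (List.replicate k (['\'', 's'] : List Char))).length = 2 * k := by
  induction k with
  | zero => simp
  | succ k ih => simp [List.replicate_succ, ih]; omega

theorem flat_succ (k : Nat) :
    List.flatten (List.replicate (k + 1) (['\'', 's'] : List Char)) =
      List.flatten (List.replicate k (['\'', 's'] : List Char)) ++ ['\'', 's'] := by
  induction k with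
  | zero => simp
  | succ k ih =>
    rw [List.replicate_succ, List.flatten_cons, ih, ← List.append_assoc,
      ← List.flatten_cons, ← List.replicate_succ, ih]

theorem flat_step {t : List Char}
    (h : t ++ ['\'', 's'] ≠ List.flatten (List.replicate ((t ++ ['\'', 's']).length / 2) ['\'', 's'])) :
    t ≠ [] ∧ t ≠ List.flatten (List.replicate (t.length / 2) ['\'', 's']) := by
  constructor
  · rintro rfl; exact h (by decide)
  · intro heq
    apply h
    have hlen : t.length = 2 * (t.length / 2) := by
      conv_lhs => rw [heq]
      exact length_flat _
    have h2 : (t ++ ['\'', 's']).length / 2 = t.length / 2 + 1 := by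
      have hx : (t ++ ['\'', 's']).length = t.length + 2 := by simp
      omega
    rw [h2, flat_succ, ← heq]

theorem stripLoop_not_end {w : List Char} (h : PySem.Chars.endswith w ['\'', 's'] = false) :
    ∀ fuel, stripLoop fuel w = (w, 0) := by
  intro fuel
  cases fuel with
  | zero => rfl
  | succ fuel => simp [stripLoop, h]

theorem stripLoop_succ (n : Nat) {w : List Char}
    (he : PySem.Chars.endswith w ['\'', 's'] = true) :
    stripLoop (n + 1) w =
      ((stripLoop n (PySem.Chars.slice w none (some (-2)))).1,
        (stripLoop n (PySem.Chars.slice w none (some (-2)))).2 + 1) := by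
  rw [stripLoop]
  simp only [he, if_true]

theorem stripLoop_stable : ∀ (fuel : Nat) (w : List Char), w.length ≤ fuel →
    stripLoop (fuel + 1) w = stripLoop fuel w := by
  intro fuel
  induction fuel with
  | zero =>
    intro w hw
    have hw0 : w = [] := List.length_eq_zero_iff.mp (Nat.le_zero.mp hw)
    subst hw0
    have he : PySem.Chars.endswith ([] : List Char) ['\'', 's'] = false := by decide
    rw [stripLoop_not_end he, stripLoop_not_end he]
  | succ fuel ih =>
    intro w hw
    by_cases he : PySem.Chars.endswith w ['\'', 's'] = true
    · obtain ⟨t, rfl⟩ := (endswith_iff w).mp he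
      have hL : (t ++ ['\'', 's']).length = t.length + 2 := by simp
      have ht : t.length ≤ fuel := by omega
      rw [show fuel + 1 + 1 = fuel + 2 from rfl]
      rw [stripLoop_succ (fuel + 1) he, stripLoop_succ fuel he, slice_drop2, ih t ht]
    · have he' : PySem.Chars.endswith w ['\'', 's'] = false := by
        simpa using he
      rw [stripLoop_not_end he', stripLoop_not_end he']

theorem stripLoop_end {t : List Char} :
    stripLoop (t ++ ['\'', 's']).length (t ++ ['\'', 's']) =
      ((stripLoop t.length t).1, (stripLoop t.length t).2 + 1) := by
  have he : PySem.Chars.endswith (t ++ ['\'', 's']) ['\'', 's'] = true :=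
    (endswith_iff _).mpr ⟨t, rfl⟩
  have hL : (t ++ ['\'', 's']).length = t.length + 2 := by simp
  rw [hL, stripLoop_succ (t.length + 1) he, slice_drop2, stripLoop_stable t.length t le_rfl]

theorem reattach_out (n : Nat) : ∀ (x : List Char),
    reattachLoop (n + 1) x =
      reattachLoop n x ++ (if PySem.List.pyGet? (reattachLoop n x) (-1) = some 's' then ['\''] else ['\'', 's']) := by
  induction n with
  | zero => intro x; rfl
  | succ n ih =>
    intro x
    rw [show reattachLoop (n + 1 + 1) x =
        reattachLoop (n + 1) (x ++ (if PySem.List.pyGet? x (-1) = some 's' then ['\''] else ['\'', 's'])) from rfl]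
    rw [ih]
    rfl

theorem inner_eq (fuel : Nat) :
    ∀ (w : List Char) (count : Int), w.length < fuel → w ≠ [] →
    (∀ c ∈ w, PySem.Chars.isspace c = false) →
    w ≠ List.flatten (List.replicate (w.length / 2) ['\'', 's']) → count ≠ 1 →
    pluralCharsA fuel w count =
      reattachLoop (stripLoop w.length w).2 (pluralizeBase (stripLoop w.length w).1) := by
  induction fuel with
  | zero => intro w count h; omega
  | succ fuel ih =>
    intro w count hlt hne hns hflat hc
    have hsplit : PySem.Chars.split₀ w = [w] := split₀_single hne hns
    rw [pluralCharsA]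
    simp only [if_neg hc, hsplit, List.getLast?_singleton, List.dropLast_singleton,
      List.nil_append, PySem.Chars.join_singleton]
    by_cases hcond : PySem.Chars.slice w (some (-2)) none = ['\'', 's']
    · obtain ⟨t, rfl⟩ := (cond_iff w).mp hcond
      simp only [if_pos hcond, slice_drop2]
      obtain ⟨htne, htflat⟩ := flat_step hflat
      have htns : ∀ c ∈ t, PySem.Chars.isspace c = false := fun c hcm => hns c (by simp [hcm])
      have hL : (t ++ ['\'', 's']).length = t.length + 2 := by simp
      have hlen : t.length < fuel := by omega
      rw [ih t count hlen htne htns htflat hc, stripLoop_end, reattach_out]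
    · simp only [if_neg hcond]
      have hend : PySem.Chars.endswith w ['\'', 's'] = false := by
        rw [Bool.eq_false_iff]
        intro he
        exact hcond ((cond_iff w).mpr ((endswith_iff w).mp he))
      rw [stripLoop_not_end hend]
      rfl

-- ===== VERDICT (by name: the statement is the Claim_ definition above) =====
theorem plural_spec : Claim_equal_plural := by
  intro role count _ hpre
  unfold Spec_plural plural plural_alt
  by_cases hc : count = 1
  · subst hc
    rw [pluralCharsA]
    simp
  · rcases hpre with h | ⟨hne, hflat⟩
    · exact absurd h hc
    have hlast : (PySem.Chars.split₀ role.toList).getLast? =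
        some ((PySem.Chars.split₀ role.toList).getLast hne) := List.getLast?_eq_some_getLast hne
    set w := (PySem.Chars.split₀ role.toList).getLast hne with hw
    have hmem : w ∈ PySem.Chars.split₀ role.toList := List.getLast_mem hne
    obtain ⟨hwne, hwns, hwlen⟩ := split₀_mem hmem
    have hflatw : w ≠ List.flatten (List.replicate (w.length / 2) ['\'', 's']) := by
      rwa [List.getLastD_eq_getLast?, hlast, Option.getD_some] at hflat
    rw [pluralCharsA]
    simp only [if_neg hc, hlast]
    by_cases hcond : PySem.Chars.slice w (some (-2)) none = ['\'', 's']
    · obtain ⟨t, hwt⟩ := (cond_iff w).mp hcond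
      rw [hwt] at hflatw hwns hwlen ⊢
      simp only [if_pos (hwt ▸ hcond), slice_drop2]
      obtain ⟨htne, htflat⟩ := flat_step hflatw
      have htns : ∀ c ∈ t, PySem.Chars.isspace c = false := fun c hcm => hwns c (by simp [hcm])
      have hL : (t ++ ['\'', 's']).length = t.length + 2 := by simp
      have hlen : t.length < role.toList.length := by omega
      rw [inner_eq role.toList.length t count hlen htne htns htflat hc, stripLoop_end, reattach_out]
    · simp only [if_neg hcond]
      have hend : PySem.Chars.endswith w ['\'', 's'] = false := by
        rw [Bool.eq_false_iff]
        intro he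
        exact hcond ((cond_iff w).mpr ((endswith_iff w).mp he))
      rw [stripLoop_not_end hend]
      rfl
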